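-- pv_equiv track=rewrite | github.com/WestonVoglesonger/adaptive-cg | src/adaptive_cg/core/extract.py | detect_dihedrals
-- ===== SOURCE A (Python) =====
-- def detect_dihedrals(
--     bonds: list[tuple[int, int]],
-- ) -> list[tuple[int, int, int, int]]:
--     """Detect dihedral quadruplets (i, j, k, l) from bonded pairs.
--
--     A dihedral exists for each consecutive chain i-j-k-l where
--     i-j, j-k, and k-l are all bonded.
--     """
--     from collections import defaultdict
--     neighbors = defaultdict(set)
--     for i, j in bonds:
--         neighbors[i].add(j)
--         neighbors[j].add(i)
--
--     dihedrals = set()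
--     for j, k in bonds:
--         for i in neighbors[j]:
--             if i == k:
--                 continue
--             for l in neighbors[k]:
--                 if l == j or l == i:
--                     continue
--                 # Canonical ordering: ensure i < l to avoid duplicates
--                 if i < l:
--                     dihedrals.add((i, j, k, l))
--                 else:
--                     dihedrals.add((l, k, j, i))
--
--     return sorted(dihedrals)
-- ===== SOURCE B (Python) =====
-- def detect_dihedrals(
--     bonds: list[tuple[int, int]],
-- ) -> list[tuple[int, int, int, int]]:
--     """Two-phase detection: enumerate angle triplets first, then extend each
--     angle by one bond into a dihedral."""
--     from collections import defaultdict
--     neighbors = defaultdict(set)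
--     for i, j in bonds:
--         neighbors[i].add(j)
--         neighbors[j].add(i)
--
--     # Phase 1: all angles i-j-k (i and k distinct neighbors of the centre j).
--     angles = []
--     for j, nbrs in neighbors.items():
--         for i in nbrs:
--             for k in nbrs:
--                 if i != k:
--                     angles.append((i, j, k))
--
--     # Phase 2: extend each angle i-j-k by a bond k-l into a dihedral.
--     dihedrals = set()
--     for i, j, k in angles:
--         for l in neighbors[k]:
--             if l != j and l != i:
--                 dihedrals.add((i, j, k, l) if i < l else (l, k, j, i))
--
--     return sorted(dihedrals)
-- ===== Notes on version B (the rewrite author's own statement) =====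
-- stated objective: alternative
-- what changed: B replaces A's single triple-nested loop over the bond list by a two-phase decomposition: it first materializes the explicit list of angle triplets i-j-k from the neighbor adjacency (iterating centres, not bonds), then in a second differently-shaped pass extends each angle by one bond k-l into a canonical dihedral.
import Mathlib
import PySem

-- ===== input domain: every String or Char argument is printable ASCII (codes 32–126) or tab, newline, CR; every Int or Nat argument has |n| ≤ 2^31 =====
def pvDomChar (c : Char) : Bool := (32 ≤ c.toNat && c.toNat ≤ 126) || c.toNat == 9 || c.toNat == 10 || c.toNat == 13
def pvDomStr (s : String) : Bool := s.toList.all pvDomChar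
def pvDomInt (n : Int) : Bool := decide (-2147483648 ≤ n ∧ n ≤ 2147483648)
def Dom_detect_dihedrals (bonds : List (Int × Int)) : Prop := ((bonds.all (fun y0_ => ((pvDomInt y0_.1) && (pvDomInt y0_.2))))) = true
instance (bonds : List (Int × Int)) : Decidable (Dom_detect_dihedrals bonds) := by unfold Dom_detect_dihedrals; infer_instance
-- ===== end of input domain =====

-- B is an ALTERNATIVE decomposition (same cost): it enumerates angle triplets first and then
-- extends each angle by one bond, instead of A's single triple-nested loop over the bond list.

-- ===== PORT A =====
-- canonical ordering helper: '(i,j,k,l) if i < l else (l,k,j,i)' (shared by both Pythons)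
def pvCanon (i j k l : Int) : Int × Int × Int × Int :=
  if i < l then (i, j, k, l) else (l, k, j, i)

-- Python compares int 4-tuples lexicographically; 'sorted(dihedrals)' is ported exactly as a
-- PySem sort with a lexicographic (Prod.Lex) key.
def pvKey (t : Int × Int × Int × Int) : Lex (Int × Lex (Int × Lex (Int × Int))) :=
  toLex (t.1, toLex (t.2.1, toLex (t.2.2.1, t.2.2.2)))

-- body of the adjacency-building loop: 'neighbors[i].add(j); neighbors[j].add(i)' (shared;
-- B builds the same defaultdict-of-sets adjacency)
def pvNbrsStep (d : PySem.Dict Int (PySem.Set Int)) (p : Int × Int) :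
    PySem.Dict Int (PySem.Set Int) :=
  let d1 := d.insert p.1 (PySem.Set.add (d.getD p.1 PySem.Set.empty) p.2)
  d1.insert p.2 (PySem.Set.add (d1.getD p.2 PySem.Set.empty) p.1)

def pvNbrs (bonds : List (Int × Int)) : PySem.Dict Int (PySem.Set Int) :=
  bonds.foldl pvNbrsStep PySem.Dict.empty

-- body of A's outer loop 'for j, k in bonds: …' (p = (j, k))
def pvStepA (N : PySem.Dict Int (PySem.Set Int)) (s : PySem.Set (Int × Int × Int × Int))
    (p : Int × Int) : PySem.Set (Int × Int × Int × Int) :=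
  (N.getD p.1 PySem.Set.empty).foldl (fun s i =>
    if i = p.2 then s
    else (N.getD p.2 PySem.Set.empty).foldl (fun s l =>
      if l = p.1 ∨ l = i then s
      else PySem.Set.add s (pvCanon i p.1 p.2 l)) s) s

def detect_dihedrals (bonds : List (Int × Int)) : List (Int × Int × Int × Int) :=
  let neighbors := pvNbrs bonds
  let dihedrals := bonds.foldl (pvStepA neighbors) PySem.Set.empty
  PySem.List.sorted dihedrals pvKey false

-- ===== PORT B =====
-- phase 1: the list of angle triplets (i, j, k), iterating the adjacency's items
def pvAngles (N : PySem.Dict Int (PySem.Set Int)) : List (Int × Int × Int) :=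
  N.items.foldl (fun acc q =>
    q.2.foldl (fun acc i =>
      q.2.foldl (fun acc k =>
        if i ≠ k then acc ++ [(i, q.1, k)] else acc) acc) acc) []

-- phase 2: extend one angle t = (i, j, k) by each bond k-l
def pvExtend (N : PySem.Dict Int (PySem.Set Int)) (s : PySem.Set (Int × Int × Int × Int))
    (t : Int × Int × Int) : PySem.Set (Int × Int × Int × Int) :=
  (N.getD t.2.2 PySem.Set.empty).foldl (fun s l =>
    if l ≠ t.2.1 ∧ l ≠ t.1 then PySem.Set.add s (pvCanon t.1 t.2.1 t.2.2 l) else s) s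

def detect_dihedrals_alt (bonds : List (Int × Int)) : List (Int × Int × Int × Int) :=
  let neighbors := pvNbrs bonds
  let angles := pvAngles neighbors
  let dihedrals := angles.foldl (pvExtend neighbors) PySem.Set.empty
  PySem.List.sorted dihedrals pvKey false

-- ===== PRECONDITION & SPEC =====
def Spec_detect_dihedrals (bonds : List (Int × Int)) (out : List (Int × Int × Int × Int)) : Prop := out = detect_dihedrals_alt bonds
instance (bonds : List (Int × Int)) (out : List (Int × Int × Int × Int)) : Decidable (Spec_detect_dihedrals bonds out) := by unfold Spec_detect_dihedrals; infer_instance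

-- ===== CLAIM (what is proved, stated in full; the proofs are below) =====
def Claim_equal_detect_dihedrals : Prop := ∀ (bonds : List (Int × Int)), Dom_detect_dihedrals bonds → Spec_detect_dihedrals bonds (detect_dihedrals bonds)

-- ===== LEMMAS AND PROOFS =====

-- a-b are bonded (in either orientation)
def pvAdj (bonds : List (Int × Int)) (a b : Int) : Prop :=
  (a, b) ∈ bonds ∨ (b, a) ∈ bonds

-- the dihedral predicate both programs enumerate
def pvChain (bonds : List (Int × Int)) (t : Int × Int × Int × Int) : Prop :=
  ∃ i j k l, pvAdj bonds j i ∧ pvAdj bonds j k ∧ i ≠ k ∧ pvAdj bonds k l ∧ l ≠ j ∧ l ≠ i ∧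
    t = pvCanon i j k l

theorem pv_mem_foldl_iff {α β : Type} (t : α) (step : List α → β → List α) (P : β → Prop)
    (h : ∀ s x, t ∈ step s x ↔ t ∈ s ∨ P x) :
    ∀ (ns : List β) (s : List α), t ∈ ns.foldl step s ↔ t ∈ s ∨ ∃ x ∈ ns, P x := by
  intro ns
  induction ns with
  | nil => simp
  | cons n rest ih =>
    intro s
    rw [List.foldl_cons, ih, h]
    simp only [List.mem_cons]
    constructor
    · rintro ((hs | hp) | ⟨x, hx, hP⟩)
      · exact Or.inl hs
      · exact Or.inr ⟨n, Or.inl rfl, hp⟩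
      · exact Or.inr ⟨x, Or.inr hx, hP⟩
    · rintro (hs | ⟨x, (rfl | hx), hP⟩)
      · exact Or.inl (Or.inl hs)
      · exact Or.inl (Or.inr hP)
      · exact Or.inr ⟨x, hx, hP⟩

theorem pv_nodup_foldl {α β : Type} (step : List α → β → List α)
    (h : ∀ s x, s.Nodup → (step s x).Nodup) :
    ∀ (ns : List β) (s : List α), s.Nodup → (ns.foldl step s).Nodup := by
  intro ns
  induction ns with
  | nil => intro s hs; exact hs
  | cons n rest ih => intro s hs; exact ih _ (h s n hs)

theorem pv_mem_nbrsStep (d : PySem.Dict Int (PySem.Set Int)) (p : Int × Int) (x y : Int) :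
    x ∈ (pvNbrsStep d p).getD y PySem.Set.empty ↔
      x ∈ d.getD y PySem.Set.empty ∨ (y, x) = p ∨ (x, y) = p := by
  obtain ⟨a, b⟩ := p
  simp only [pvNbrsStep, PySem.Dict.getD_insert, Prod.mk.injEq]
  split_ifs <;> simp_all [PySem.Set.mem_add]

theorem pv_mem_nbrs (bonds : List (Int × Int)) (x y : Int) :
    x ∈ (pvNbrs bonds).getD y PySem.Set.empty ↔ pvAdj bonds y x := by
  have main : ∀ (bs : List (Int × Int)) (d : PySem.Dict Int (PySem.Set Int)),
      x ∈ (bs.foldl pvNbrsStep d).getD y PySem.Set.empty ↔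
        x ∈ d.getD y PySem.Set.empty ∨ (y, x) ∈ bs ∨ (x, y) ∈ bs := by
    intro bs
    induction bs with
    | nil => simp
    | cons p rest ih =>
      intro d
      rw [List.foldl_cons, ih, pv_mem_nbrsStep]
      simp only [List.mem_cons]
      tauto
  have h := main bonds PySem.Dict.empty
  unfold pvNbrs pvAdj
  rw [h, PySem.Dict.getD_empty]
  simp [PySem.Set.empty]

theorem pv_nodup_keys_nbrs (bonds : List (Int × Int)) : (pvNbrs bonds).keys.Nodup := by
  have main : ∀ (bs : List (Int × Int)) (d : PySem.Dict Int (PySem.Set Int)),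
      d.keys.Nodup → (bs.foldl pvNbrsStep d).keys.Nodup := by
    intro bs
    induction bs with
    | nil => intro d h; exact h
    | cons p rest ih =>
      intro d h
      refine ih _ ?_
      unfold pvNbrsStep
      exact PySem.Dict.nodup_keys_insert _ _ _ (PySem.Dict.nodup_keys_insert _ _ _ h)
  exact main bonds _ PySem.Dict.nodup_keys_empty

theorem pv_canon_swap (i j k l : Int) (h : i ≠ l) : pvCanon l k j i = pvCanon i j k l := by
  unfold pvCanon
  split_ifs <;> first | rfl | omega

-- A's accumulated set, characterized
theorem pv_mem_stepA (N : PySem.Dict Int (PySem.Set Int)) (s : PySem.Set (Int × Int × Int × Int))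
    (p : Int × Int) (t : Int × Int × Int × Int) :
    t ∈ pvStepA N s p ↔ t ∈ s ∨ ∃ i ∈ N.getD p.1 PySem.Set.empty, i ≠ p.2 ∧
      ∃ l ∈ N.getD p.2 PySem.Set.empty, l ≠ p.1 ∧ l ≠ i ∧ t = pvCanon i p.1 p.2 l := by
  have hinner : ∀ (i : Int) (s' : List (Int × Int × Int × Int)) (l : Int),
      (t ∈ if l = p.1 ∨ l = i then s' else PySem.Set.add s' (pvCanon i p.1 p.2 l)) ↔
        t ∈ s' ∨ (¬(l = p.1 ∨ l = i) ∧ t = pvCanon i p.1 p.2 l) := by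
    intro i s' l
    by_cases hc : l = p.1 ∨ l = i
    · rw [if_pos hc]; tauto
    · rw [if_neg hc, PySem.Set.mem_add]; tauto
  have hmid : ∀ (s' : List (Int × Int × Int × Int)) (i : Int),
      (t ∈ if i = p.2 then s'
        else (N.getD p.2 PySem.Set.empty).foldl
          (fun s l => if l = p.1 ∨ l = i then s else PySem.Set.add s (pvCanon i p.1 p.2 l)) s') ↔
        t ∈ s' ∨ (i ≠ p.2 ∧ ∃ l ∈ N.getD p.2 PySem.Set.empty, l ≠ p.1 ∧ l ≠ i ∧
          t = pvCanon i p.1 p.2 l) := by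
    intro s' i
    by_cases hik : i = p.2
    · rw [if_pos hik]; tauto
    · rw [if_neg hik,
        pv_mem_foldl_iff t _ (fun l => ¬(l = p.1 ∨ l = i) ∧ t = pvCanon i p.1 p.2 l)
          (hinner i)]
      constructor
      · rintro (hs | ⟨l, hl, hc, ht⟩)
        · exact Or.inl hs
        · exact Or.inr ⟨hik, l, hl, fun h1 => hc (Or.inl h1), fun h2 => hc (Or.inr h2), ht⟩
      · rintro (hs | ⟨_, l, hl, h1, h2, ht⟩)
        · exact Or.inl hs
        · exact Or.inr ⟨l, hl, fun hc => hc.elim h1 h2, ht⟩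
  unfold pvStepA
  rw [pv_mem_foldl_iff t _ _ hmid]

theorem pv_mem_A (bonds : List (Int × Int)) (t : Int × Int × Int × Int) :
    t ∈ bonds.foldl (pvStepA (pvNbrs bonds)) PySem.Set.empty ↔
      ∃ p ∈ bonds, ∃ i, pvAdj bonds p.1 i ∧ i ≠ p.2 ∧
        ∃ l, pvAdj bonds p.2 l ∧ l ≠ p.1 ∧ l ≠ i ∧ t = pvCanon i p.1 p.2 l := by
  have hstep : ∀ (s : List (Int × Int × Int × Int)) (p : Int × Int),
      t ∈ pvStepA (pvNbrs bonds) s p ↔ t ∈ s ∨ (∃ i, pvAdj bonds p.1 i ∧ i ≠ p.2 ∧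
        ∃ l, pvAdj bonds p.2 l ∧ l ≠ p.1 ∧ l ≠ i ∧ t = pvCanon i p.1 p.2 l) := by
    intro s p
    rw [pv_mem_stepA]
    constructor
    · rintro (hs | ⟨i, hi, hik, l, hl, h1, h2, ht⟩)
      · exact Or.inl hs
      · exact Or.inr ⟨i, (pv_mem_nbrs bonds i p.1).1 hi, hik,
          l, (pv_mem_nbrs bonds l p.2).1 hl, h1, h2, ht⟩
    · rintro (hs | ⟨i, hi, hik, l, hl, h1, h2, ht⟩)
      · exact Or.inl hs
      · exact Or.inr ⟨i, (pv_mem_nbrs bonds i p.1).2 hi, hik,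
          l, (pv_mem_nbrs bonds l p.2).2 hl, h1, h2, ht⟩
  rw [pv_mem_foldl_iff t _ _ hstep]
  simp [PySem.Set.empty]

-- B's angle list, characterized
theorem pv_mem_angles (N : PySem.Dict Int (PySem.Set Int)) (ang : Int × Int × Int) :
    ang ∈ pvAngles N ↔ ∃ q ∈ N.items, ∃ i ∈ q.2, ∃ k ∈ q.2, i ≠ k ∧ ang = (i, q.1, k) := by
  have hinner : ∀ (q : Int × PySem.Set Int) (i : Int) (s : List (Int × Int × Int)) (k : Int),
      (ang ∈ if i ≠ k then s ++ [(i, q.1, k)] else s) ↔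
        ang ∈ s ∨ (i ≠ k ∧ ang = (i, q.1, k)) := by
    intro q i s k
    by_cases hik : i ≠ k
    · rw [if_pos hik]; simp [hik]
    · rw [if_neg hik]; tauto
  have hmid : ∀ (q : Int × PySem.Set Int) (s : List (Int × Int × Int)) (i : Int),
      (ang ∈ q.2.foldl (fun acc k => if i ≠ k then acc ++ [(i, q.1, k)] else acc) s) ↔
        ang ∈ s ∨ ∃ k ∈ q.2, i ≠ k ∧ ang = (i, q.1, k) := by
    intro q s i
    rw [pv_mem_foldl_iff ang _ (fun k => i ≠ k ∧ ang = (i, q.1, k)) (hinner q i)]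
  have hout : ∀ (s : List (Int × Int × Int)) (q : Int × PySem.Set Int),
      (ang ∈ q.2.foldl (fun acc i =>
          q.2.foldl (fun acc k => if i ≠ k then acc ++ [(i, q.1, k)] else acc) acc) s) ↔
        ang ∈ s ∨ ∃ i ∈ q.2, ∃ k ∈ q.2, i ≠ k ∧ ang = (i, q.1, k) := by
    intro s q
    rw [pv_mem_foldl_iff ang _ (fun i => ∃ k ∈ q.2, i ≠ k ∧ ang = (i, q.1, k)) (hmid q)]
  unfold pvAngles
  rw [pv_mem_foldl_iff ang _ _ hout]
  simp

-- getD membership ↔ an items entry, given unique keys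
theorem pv_mem_getD_iff_items (bonds : List (Int × Int)) (j x : Int) :
    x ∈ (pvNbrs bonds).getD j PySem.Set.empty ↔
      ∃ s, (j, s) ∈ (pvNbrs bonds).items ∧ x ∈ s := by
  constructor
  · intro hx
    cases hget : (pvNbrs bonds).get? j with
    | none =>
      rw [PySem.Dict.getD_of_get?_eq_none _ _ hget] at hx
      simp [PySem.Set.empty] at hx
    | some s =>
      refine ⟨s, PySem.Dict.mem_items_of_get?_eq_some _ hget, ?_⟩
      rwa [PySem.Dict.getD_of_get?_eq_some _ _ hget] at hx
  · rintro ⟨s, hmem, hx⟩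
    rwa [PySem.Dict.getD_of_mem_items _ hmem (pv_nodup_keys_nbrs bonds)]

-- B's accumulated set, characterized
theorem pv_mem_B (bonds : List (Int × Int)) (t : Int × Int × Int × Int) :
    t ∈ (pvAngles (pvNbrs bonds)).foldl (pvExtend (pvNbrs bonds)) PySem.Set.empty ↔
      ∃ a ∈ pvAngles (pvNbrs bonds), ∃ l, pvAdj bonds a.2.2 l ∧ l ≠ a.2.1 ∧ l ≠ a.1 ∧
        t = pvCanon a.1 a.2.1 a.2.2 l := by
  have hinner : ∀ (a : Int × Int × Int) (s' : List (Int × Int × Int × Int)) (l : Int),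
      (t ∈ if l ≠ a.2.1 ∧ l ≠ a.1 then PySem.Set.add s' (pvCanon a.1 a.2.1 a.2.2 l) else s') ↔
        t ∈ s' ∨ ((l ≠ a.2.1 ∧ l ≠ a.1) ∧ t = pvCanon a.1 a.2.1 a.2.2 l) := by
    intro a s' l
    by_cases hc : l ≠ a.2.1 ∧ l ≠ a.1
    · rw [if_pos hc, PySem.Set.mem_add]; tauto
    · rw [if_neg hc]; tauto
  have hstep : ∀ (s : List (Int × Int × Int × Int)) (a : Int × Int × Int),
      t ∈ pvExtend (pvNbrs bonds) s a ↔ t ∈ s ∨ (∃ l, pvAdj bonds a.2.2 l ∧ l ≠ a.2.1 ∧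
        l ≠ a.1 ∧ t = pvCanon a.1 a.2.1 a.2.2 l) := by
    intro s a
    unfold pvExtend
    rw [pv_mem_foldl_iff t _ (fun l => (l ≠ a.2.1 ∧ l ≠ a.1) ∧ t = pvCanon a.1 a.2.1 a.2.2 l)
      (hinner a)]
    constructor
    · rintro (hs | ⟨l, hl, ⟨h1, h2⟩, ht⟩)
      · exact Or.inl hs
      · exact Or.inr ⟨l, (pv_mem_nbrs bonds l a.2.2).1 hl, h1, h2, ht⟩
    · rintro (hs | ⟨l, hl, h1, h2, ht⟩)
      · exact Or.inl hs
      · exact Or.inr ⟨l, (pv_mem_nbrs bonds l a.2.2).2 hl, ⟨h1, h2⟩, ht⟩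
  rw [pv_mem_foldl_iff t _ _ hstep]
  simp [PySem.Set.empty]

-- both characterizations describe pvChain
theorem pv_A_iff_chain (bonds : List (Int × Int)) (t : Int × Int × Int × Int) :
    t ∈ bonds.foldl (pvStepA (pvNbrs bonds)) PySem.Set.empty ↔ pvChain bonds t := by
  rw [pv_mem_A]
  constructor
  · rintro ⟨⟨j, k⟩, hp, i, hji, hik, l, hkl, hlj, hli, ht⟩
    exact ⟨i, j, k, l, hji, Or.inl hp, hik, hkl, hlj, hli, ht⟩
  · rintro ⟨i, j, k, l, hji, hjk, hik, hkl, hlj, hli, ht⟩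
    rcases hjk with hjk | hkj
    · exact ⟨(j, k), hjk, i, hji, hik, l, hkl, hlj, hli, ht⟩
    · refine ⟨(k, j), hkj, l, hkl, hlj, i, hji, hik, fun h => hli h.symm, ?_⟩
      rw [ht]
      exact (pv_canon_swap i j k l (fun h => hli h.symm)).symm

theorem pv_B_iff_chain (bonds : List (Int × Int)) (t : Int × Int × Int × Int) :
    t ∈ (pvAngles (pvNbrs bonds)).foldl (pvExtend (pvNbrs bonds)) PySem.Set.empty ↔
      pvChain bonds t := by
  rw [pv_mem_B]
  constructor
  · rintro ⟨a, ha, l, hkl, hlj, hli, ht⟩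
    rw [pv_mem_angles] at ha
    obtain ⟨q, hq, i, hi, k, hk, hik, hae⟩ := ha
    obtain ⟨j, s⟩ := q
    subst hae
    have hji : pvAdj bonds j i :=
      (pv_mem_nbrs bonds i j).1 ((pv_mem_getD_iff_items bonds j i).2 ⟨s, hq, hi⟩)
    have hjk : pvAdj bonds j k :=
      (pv_mem_nbrs bonds k j).1 ((pv_mem_getD_iff_items bonds j k).2 ⟨s, hq, hk⟩)
    exact ⟨i, j, k, l, hji, hjk, hik, hkl, hlj, hli, ht⟩
  · rintro ⟨i, j, k, l, hji, hjk, hik, hkl, hlj, hli, ht⟩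
    have hi' : i ∈ (pvNbrs bonds).getD j PySem.Set.empty := (pv_mem_nbrs bonds i j).2 hji
    have hk' : k ∈ (pvNbrs bonds).getD j PySem.Set.empty := (pv_mem_nbrs bonds k j).2 hjk
    obtain ⟨s, hqs, his⟩ := (pv_mem_getD_iff_items bonds j i).1 hi'
    have hks : k ∈ s := by
      rwa [PySem.Dict.getD_of_mem_items _ hqs (pv_nodup_keys_nbrs bonds)] at hk'
    refine ⟨(i, j, k), ?_, l, hkl, hlj, hli, ht⟩
    rw [pv_mem_angles]
    exact ⟨(j, s), hqs, i, his, k, hks, hik, rfl⟩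

-- Nodup of both accumulated sets
theorem pv_nodup_A (bonds : List (Int × Int)) :
    (bonds.foldl (pvStepA (pvNbrs bonds)) PySem.Set.empty).Nodup := by
  refine pv_nodup_foldl _ ?_ bonds _ (by simp [PySem.Set.empty])
  intro s p hs
  unfold pvStepA
  refine pv_nodup_foldl _ ?_ _ _ hs
  intro s' i hs'
  split_ifs
  · exact hs'
  · refine pv_nodup_foldl _ ?_ _ _ hs'
    intro s'' l hs''
    split_ifs
    · exact hs''
    · exact PySem.Set.nodup_add _ _ hs''

theorem pv_nodup_B (bonds : List (Int × Int)) :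
    ((pvAngles (pvNbrs bonds)).foldl (pvExtend (pvNbrs bonds)) PySem.Set.empty).Nodup := by
  refine pv_nodup_foldl _ ?_ _ _ (by simp [PySem.Set.empty])
  intro s a hs
  unfold pvExtend
  refine pv_nodup_foldl _ ?_ _ _ hs
  intro s' l hs'
  split_ifs
  · exact PySem.Set.nodup_add _ _ hs'
  · exact hs'

theorem pvKey_inj : Function.Injective pvKey := by
  intro a b h
  obtain ⟨a1, a2, a3, a4⟩ := a
  obtain ⟨b1, b2, b3, b4⟩ := b
  simp [pvKey, Prod.ext_iff] at h
  simp [Prod.ext_iff]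
  exact h

-- ===== VERDICT (by name: the statement is the Claim_ definition above) =====
theorem detect_dihedrals_spec : Claim_equal_detect_dihedrals := by
  intro bonds _
  unfold Spec_detect_dihedrals detect_dihedrals detect_dihedrals_alt
  apply PySem.List.sorted_eq_sorted_of_perm _ _ pvKey pvKey_inj
  rw [List.perm_ext_iff_of_nodup (pv_nodup_A bonds) (pv_nodup_B bonds)]
  intro t
  rw [pv_A_iff_chain, pv_B_iff_chain]
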